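-- pv_equiv track=rewrite | github.com/envoyproxy/envoy | tools/envoy_headersplit/profile.py | to_testname
-- ===== SOURCE A (Python) =====
-- def to_testname(filename):
--   # maps test lib file name to bazel target name
--   # e.g. "test/server/server_fuzz.cc" -> "//test/server:server_fuzz"
--   filename = filename.strip()
--   testname = "//" + filename[:-3] # remove .cc in filename
--   last_slash = 0
--   for i, c in enumerate(testname):
--     if c == '/':
--       last_slash = i
--   testname = list(testname)
--   testname[last_slash] = ':'
--   testname = ''.join(testname)
--   return testname
-- ===== SOURCE B (Python) =====
-- def to_testname(filename):
--   # maps test lib file name to bazel target name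
--   # split the prefixed path into its '/'-separated segments, then reassemble:
--   # all segments but the last joined with '/', a ':', and the last segment
--   parts = ("//" + filename.strip()[:-3]).split('/')
--   return '/'.join(parts[:-1]) + ':' + parts[-1]
-- ===== Notes on version B (the rewrite author's own statement) =====
-- stated objective: simpler
-- what changed: B decomposes the prefixed path into a list of '/'-separated segments with split and reassembles it ('/'-join of all but the last segment, ':', the last segment), instead of A's index scan over enumerate for the last slash followed by list() conversion, single-character mutation and join.
import Mathlib
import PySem

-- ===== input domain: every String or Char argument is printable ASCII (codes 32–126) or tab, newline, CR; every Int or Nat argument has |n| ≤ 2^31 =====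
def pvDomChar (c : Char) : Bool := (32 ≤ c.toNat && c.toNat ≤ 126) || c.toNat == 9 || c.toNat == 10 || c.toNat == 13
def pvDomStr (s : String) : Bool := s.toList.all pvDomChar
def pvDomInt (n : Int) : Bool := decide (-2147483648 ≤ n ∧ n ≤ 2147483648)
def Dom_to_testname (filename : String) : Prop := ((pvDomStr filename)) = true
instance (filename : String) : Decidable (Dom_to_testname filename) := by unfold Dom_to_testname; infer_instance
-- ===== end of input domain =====

-- B decomposes the prefixed path into its '/'-separated segments with split and reassembles
-- them ('/'-join of all but the last, ':', last segment), instead of A's last-slash index scan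
-- over enumerate plus list conversion and single-character mutation (simpler decomposition, same cost).

-- ===== PORT A =====
def to_testname (filename : String) : String :=
  let f := PySem.Chars.strip filename.toList
  let testname := ['/', '/'] ++ PySem.List.slice f none (some (-3))
  let last_slash : Int :=
    (PySem.List.enumerate testname 0).foldl
      (fun acc (p : Int × Char) => if p.2 = '/' then p.1 else acc) 0
  -- testname[last_slash] = ':' — last_slash is always a valid index (an enumerate index or 0 into a list of length ≥ 2), so pySetD is exact here
  String.ofList (PySem.List.pySetD testname last_slash ':')

-- ===== PORT B =====
def to_testname_alt (filename : String) : String :=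
  let parts := (['/', '/'] ++ PySem.List.slice (PySem.Chars.strip filename.toList) none (some (-3))).splitOn '/'
  -- parts[-1]: split always returns a nonempty list, so pyGet? is some and the .getD default is never used
  String.ofList (PySem.Chars.join ['/'] (PySem.List.slice parts none (some (-1))) ++
    ':' :: (PySem.List.pyGet? parts (-1)).getD [])

-- ===== PRECONDITION & SPEC =====
def Spec_to_testname (filename : String) (out : String) : Prop := out = to_testname_alt filename
instance (filename : String) (out : String) : Decidable (Spec_to_testname filename out) := by unfold Spec_to_testname; infer_instance

-- ===== CLAIM (what is proved, stated in full; the proofs are below) =====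
def Claim_equal_to_testname : Prop := ∀ (filename : String), Dom_to_testname filename → Spec_to_testname filename (to_testname filename)

-- ===== LEMMAS AND PROOFS =====

theorem foldl_lastSlash_noSlash (t : List Char) (h : ∀ c ∈ t, c ≠ '/') (k a : Int) :
    (PySem.List.enumerate t k).foldl
      (fun acc (p : Int × Char) => if p.2 = '/' then p.1 else acc) a = a := by
  induction t generalizing k a with
  | nil => simp [PySem.List.enumerate_nil]
  | cons c t ih =>
    rw [PySem.List.enumerate_cons]
    simp only [List.foldl_cons]
    rw [if_neg (h c (List.mem_cons_self))]
    exact ih (fun c hc => h c (List.mem_cons_of_mem _ hc)) (k + 1) a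

theorem foldl_lastSlash_split (hd t : List Char) (h : ∀ c ∈ t, c ≠ '/') (a : Int) :
    (PySem.List.enumerate (hd ++ '/' :: t) 0).foldl
      (fun acc (p : Int × Char) => if p.2 = '/' then p.1 else acc) a = hd.length := by
  rw [PySem.List.enumerate_append, List.foldl_append, PySem.List.enumerate_cons]
  simp only [List.foldl_cons]
  rw [foldl_lastSlash_noSlash t h]
  simp

theorem set_at_head_length (h t : List Char) (c : Char) :
    (h ++ '/' :: t).set h.length c = h ++ c :: t := by
  induction h with
  | nil => rfl
  | cons x h ih => simp [ih]

theorem getLast?_splitOnP_no_p {α : Type} (p : α → Bool) (xs lp : List α)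
    (h : (xs.splitOnP p).getLast? = some lp) : ∀ c ∈ lp, ¬ p c = true := by
  induction xs generalizing lp with
  | nil =>
    simp only [List.splitOnP_nil, List.getLast?_singleton, Option.some.injEq] at h
    subst h; simp
  | cons x xs ih =>
    rw [List.splitOnP_cons] at h
    obtain ⟨y, r, hr⟩ := List.exists_cons_of_ne_nil (List.splitOnP_ne_nil p xs)
    rw [hr] at h ih
    by_cases hp : p x
    · rw [if_pos hp, List.getLast?_cons_cons] at h
      exact ih lp h
    · rw [if_neg hp, List.modifyHead_cons] at h
      cases r with
      | nil =>
        simp only [List.getLast?_singleton, Option.some.injEq] at h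
        subst h
        intro c hc
        rcases List.mem_cons.mp hc with rfl | hcy
        · exact hp
        · exact ih y (by simp) c hcy
      | cons z r' =>
        rw [List.getLast?_cons_cons] at h
        exact ih lp (by rw [List.getLast?_cons_cons]; exact h)

theorem intercalate_cons₂ {α : Type} (x : α) (a b : List α) (l : List (List α)) :
    [x].intercalate (a :: b :: l) = a ++ x :: [x].intercalate (b :: l) := by
  simp [List.intercalate, List.intersperse_cons₂]

theorem intercalate_concat {α : Type} (x : α) (a : List α) (ps : List (List α)) (lp : List α) :
    [x].intercalate ((a :: ps) ++ [lp]) = [x].intercalate (a :: ps) ++ x :: lp := by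
  induction ps generalizing a with
  | nil => simp [List.intercalate]
  | cons b ps' ih =>
    rw [show (a :: b :: ps') ++ [lp] = a :: b :: (ps' ++ [lp]) from rfl,
      intercalate_cons₂ x a b (ps' ++ [lp]),
      show (b :: (ps' ++ [lp])) = (b :: ps') ++ [lp] from rfl,
      ih b, intercalate_cons₂ x a b ps']
    simp

theorem main_eq (u : List Char) :
    String.ofList (PySem.List.pySetD (['/', '/'] ++ u)
      ((PySem.List.enumerate (['/', '/'] ++ u) 0).foldl
        (fun acc (p : Int × Char) => if p.2 = '/' then p.1 else acc) 0) ':')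
    = String.ofList (PySem.Chars.join ['/']
        (PySem.List.slice ((['/', '/'] ++ u).splitOn '/') none (some (-1))) ++
        ':' :: (PySem.List.pyGet? ((['/', '/'] ++ u).splitOn '/') (-1)).getD []) := by
  have hsplit : (['/', '/'] ++ u).splitOn '/' =
      ([] : List Char) :: ([] : List Char) :: u.splitOn '/' := by
    simp [List.splitOn, List.splitOnP_cons]
  rcases List.eq_nil_or_concat (u.splitOn '/') with hq | ⟨qs, lp, hq⟩
  · rw [List.splitOn] at hq
    exact absurd hq (List.splitOnP_ne_nil _ _)
  · rw [List.concat_eq_append] at hq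
    have hparts : (['/', '/'] ++ u).splitOn '/' =
        (([] : List Char) :: ([] : List Char) :: qs) ++ [lp] := by
      rw [hsplit, hq]; simp
    have hlast : ((['/', '/'] ++ u).splitOnP (· == '/')).getLast? = some lp := by
      rw [← List.splitOn, hparts]; exact List.getLast?_concat
    have hnos : ∀ c ∈ lp, c ≠ '/' := by
      intro c hc
      have := getLast?_splitOnP_no_p (· == '/') _ lp hlast c hc
      simpa using this
    have hcs : ['/', '/'] ++ u =
        ['/'].intercalate (([] : List Char) :: ([] : List Char) :: qs) ++ '/' :: lp := by
      conv_lhs => rw [← List.intercalate_splitOn (xs := ['/', '/'] ++ u) '/']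
      rw [hparts, intercalate_concat]
    rw [hparts, PySem.List.slice_to_neg_one, List.dropLast_concat,
      PySem.List.pyGet?_neg_one_append_singleton]
    simp only [Option.getD_some, PySem.Chars.join]
    conv_lhs => rw [hcs]
    rw [foldl_lastSlash_split _ _ hnos, PySem.List.pySetD_natCast, set_at_head_length]

-- ===== VERDICT (by name: the statement is the Claim_ definition above) =====
theorem to_testname_spec : Claim_equal_to_testname := by
  intro filename _
  unfold Spec_to_testname to_testname to_testname_alt
  exact main_eq (PySem.List.slice (PySem.Chars.strip filename.toList) none (some (-3)))
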